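-- pv_equiv track=rewrite | github.com/VoiceofSiren/StudyingProgramming | Python/Coding Test/Programmers/lv1/p-059.py | remove_alphabet
-- ===== SOURCE A (Python) =====
-- def remove_alphabet(b):
--     new_b = ''
--     for i in range(len(b)):
--         if 97 <= ord(b[i]) <= 122:
--             new_b += ''
--         else:
--             new_b += b[i]
--     return new_b
-- ===== SOURCE B (Python) =====
-- _TABLE = str.maketrans('', '', 'abcdefghijklmnopqrstuvwxyz')
--
-- def remove_alphabet(b):
--     return b.translate(_TABLE)
-- ===== Notes on version B (the rewrite author's own statement) =====
-- stated objective: idiomatic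
-- what changed: Replaces the explicit index loop with per-character ord-range branch and string concatenation by a precomputed deletion translation table applied in a single str.translate pass.
import Mathlib
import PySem

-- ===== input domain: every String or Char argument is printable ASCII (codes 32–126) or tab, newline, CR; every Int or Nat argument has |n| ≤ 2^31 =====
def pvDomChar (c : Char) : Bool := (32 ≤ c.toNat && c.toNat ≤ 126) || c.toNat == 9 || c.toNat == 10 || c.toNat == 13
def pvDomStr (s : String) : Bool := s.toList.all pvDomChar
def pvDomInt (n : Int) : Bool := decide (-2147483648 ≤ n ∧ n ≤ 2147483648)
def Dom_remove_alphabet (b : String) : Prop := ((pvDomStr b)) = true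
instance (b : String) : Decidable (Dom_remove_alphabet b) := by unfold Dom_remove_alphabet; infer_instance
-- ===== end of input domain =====

-- B replaces A's index loop and per-char ord-range branch by a deletion translation
-- table applied via str.translate (one table-driven pass); same return value (idiomatic).
-- ===== PORT A =====
def remove_alphabet (b : String) : String :=
  String.ofList ((PySem.List.pyRange 0 (b.toList.length : Int) 1).foldl
    (fun acc i =>
      if 97 ≤ (PySem.List.pyGetD b.toList i ' ').toNat ∧
         (PySem.List.pyGetD b.toList i ' ').toNat ≤ 122
      then acc ++ ([] : List Char)
      else acc ++ [PySem.List.pyGetD b.toList i ' ']) [])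

-- ===== PORT B =====
-- translate with a table mapping codes 97..122 to deletion: a single pass keeping
-- every character whose code is not in the table.
def remove_alphabet_alt (b : String) : String :=
  String.ofList (b.toList.filter (fun c => !(97 ≤ c.toNat && c.toNat ≤ 122)))

-- ===== PRECONDITION & SPEC =====
def Spec_remove_alphabet (b : String) (out : String) : Prop := out = remove_alphabet_alt b
instance (b : String) (out : String) : Decidable (Spec_remove_alphabet b out) := by unfold Spec_remove_alphabet; infer_instance

-- ===== CLAIM (what is proved, stated in full; the proofs are below) =====
def Claim_equal_remove_alphabet : Prop := ∀ (b : String), Dom_remove_alphabet b → Spec_remove_alphabet b (remove_alphabet b)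

-- ===== LEMMAS AND PROOFS =====

-- A's loop, read over the character list, accumulates exactly the kept characters.
theorem foldA_eq_filter (l acc : List Char) :
    l.foldl (fun acc c =>
      if 97 ≤ c.toNat ∧ c.toNat ≤ 122 then acc ++ ([] : List Char) else acc ++ [c]) acc
    = acc ++ l.filter (fun c => !(97 ≤ c.toNat && c.toNat ≤ 122)) := by
  induction l generalizing acc with
  | nil => simp
  | cons c t ih =>
    rw [List.foldl_cons, List.filter_cons]
    by_cases h : 97 ≤ c.toNat ∧ c.toNat ≤ 122
    · rw [if_pos h, ih]
      simp [h.1, h.2]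
    · rw [if_neg h, ih]
      rcases Decidable.not_and_iff_or_not.mp h with h1 | h1 <;> simp [h1]

-- ===== VERDICT (by name: the statement is the Claim_ definition above) =====
theorem remove_alphabet_spec : Claim_equal_remove_alphabet := by
  intro b _
  unfold Spec_remove_alphabet remove_alphabet remove_alphabet_alt
  rw [PySem.List.foldl_pyRange_zero_pyGetD' b.toList ' '
    (fun acc c => if 97 ≤ c.toNat ∧ c.toNat ≤ 122 then acc ++ ([] : List Char) else acc ++ [c]) []]
  rw [foldA_eq_filter]
  simp
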